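-- pv_equiv track=rewrite | github.com/camilo7234/automatizacion_kumon | backend/app/services/result_calculator.py | _lookup_starting_point_pages
-- ===== SOURCE A (Python) =====
-- def _lookup_starting_point_pages(
--     paginas_ok:    int,
--     umbral_minimo: int,
--     punto_map:     dict,
-- ) -> str:
--     if paginas_ok < umbral_minimo:
--         return punto_map.get("menos_7", punto_map.get("menos_umbral", "nivel_actual"))
--
--     key = str(paginas_ok)
--     if key in punto_map:
--         return punto_map[key]
--
--     for k in sorted(
--         punto_map.keys(),
--         key=lambda x: int(x) if x.isdigit() else -1,
--         reverse=True
--     ):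
--         if k.isdigit() and int(k) <= paginas_ok:
--             return punto_map[k]
--
--     return "nivel_actual"
-- ===== SOURCE B (Python) =====
-- def _lookup_starting_point_pages(
--     paginas_ok:    int,
--     umbral_minimo: int,
--     punto_map:     dict,
-- ) -> str:
--     if paginas_ok < umbral_minimo:
--         return punto_map.get("menos_7", punto_map.get("menos_umbral", "nivel_actual"))
--
--     key = str(paginas_ok)
--     if key in punto_map:
--         return punto_map[key]
--
--     # single pass: keep the first-seen item with the largest numeric key <= paginas_ok
--     best = None
--     for k, v in punto_map.items():
--         if k.isdigit():
--             n = int(k)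
--             if n <= paginas_ok and (best is None or n > best[0]):
--                 best = (n, v)
--     return best[1] if best is not None else "nivel_actual"
-- ===== Notes on version B (the rewrite author's own statement) =====
-- stated objective: simpler
-- what changed: The reverse sort of all keys followed by a scan for the first qualifying key is replaced by a single pass over the items that keeps the first-seen item with the largest numeric key <= paginas_ok (strict '>' update preserves A's stable-sort tie-break); the two initial guards are kept verbatim.
import Mathlib
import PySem

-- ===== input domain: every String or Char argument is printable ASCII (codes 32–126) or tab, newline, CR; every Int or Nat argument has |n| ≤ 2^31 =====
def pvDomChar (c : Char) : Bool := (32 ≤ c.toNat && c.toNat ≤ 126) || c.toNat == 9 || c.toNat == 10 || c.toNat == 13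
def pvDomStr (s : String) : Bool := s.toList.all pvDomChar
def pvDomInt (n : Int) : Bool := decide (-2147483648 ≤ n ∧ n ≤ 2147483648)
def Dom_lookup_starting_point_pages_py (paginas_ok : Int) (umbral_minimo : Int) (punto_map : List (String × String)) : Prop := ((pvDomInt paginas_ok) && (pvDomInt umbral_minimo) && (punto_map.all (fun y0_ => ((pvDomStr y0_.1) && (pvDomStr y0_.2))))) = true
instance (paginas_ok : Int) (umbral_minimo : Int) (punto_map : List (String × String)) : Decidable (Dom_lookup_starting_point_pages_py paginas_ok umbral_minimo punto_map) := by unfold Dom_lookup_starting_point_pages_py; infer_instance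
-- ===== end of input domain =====

-- B replaces A's reverse sort-and-scan by a single pass keeping the first-seen item with the
-- largest numeric key ≤ paginas_ok (objective: simpler).

-- ===== PORT A =====

-- int(k), called by A only when k.isdigit() is true, where ofStr? always returns some
def pvIntOf (k : String) : Int := (PySem.Int.ofStr? k).getD 0

-- A's sort key: lambda x: int(x) if x.isdigit() else -1
def pvSortKey (x : String) : Int := if PySem.Str.strIsdigit x then pvIntOf x else -1

-- A's for-loop over the sorted keys: return punto_map[k] on the first qualifying key
def pvLoopA (paginas_ok : Int) (d : PySem.Dict String String) : List String → String
  | [] => "nivel_actual"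
  | k :: rest =>
      if PySem.Str.strIsdigit k && decide (pvIntOf k ≤ paginas_ok) then
        (d.get? k).getD ""   -- punto_map[k]; k ∈ keys, so get? is some and the default is never used
      else pvLoopA paginas_ok d rest

def lookup_starting_point_pages_py (paginas_ok : Int) (umbral_minimo : Int) (punto_map : List (String × String)) : String :=
  let d : PySem.Dict String String := PySem.Dict.mk punto_map
  if paginas_ok < umbral_minimo then
    (d.get? "menos_7").getD ((d.get? "menos_umbral").getD "nivel_actual")
  else
    let key := PySem.Int.toStr paginas_ok
    if d.contains key then (d.get? key).getD ""   -- punto_map[key]; guarded by the contains check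
    else pvLoopA paginas_ok d (PySem.List.sorted d.keys pvSortKey true)

-- ===== PORT B =====

-- B's loop body: update best when k is numeric, int(k) <= paginas_ok and strictly improves
def pvStepB (paginas_ok : Int) (best : Option (Int × String)) (kv : String × String) : Option (Int × String) :=
  if PySem.Str.strIsdigit kv.1 then
    let n := (PySem.Int.ofStr? kv.1).getD 0
    if decide (n ≤ paginas_ok) && (match best with | none => true | some b => decide (n > b.1)) then some (n, kv.2)
    else best
  else best

def lookup_starting_point_pages_py_alt (paginas_ok : Int) (umbral_minimo : Int) (punto_map : List (String × String)) : String :=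
  let d : PySem.Dict String String := PySem.Dict.mk punto_map
  if paginas_ok < umbral_minimo then
    (d.get? "menos_7").getD ((d.get? "menos_umbral").getD "nivel_actual")
  else
    let key := PySem.Int.toStr paginas_ok
    if d.contains key then (d.get? key).getD ""
    else
      match d.items.foldl (pvStepB paginas_ok) none with
      | some b => b.2
      | none => "nivel_actual"

-- ===== PRECONDITION & SPEC =====
-- Pre_ excludes association lists with duplicate keys: they do not represent a Python dict
-- uniquely (dict construction keeps the last binding, first-match lookup the first), so the
-- behaviour there is an artefact of the representation.
def Pre_lookup_starting_point_pages_py (paginas_ok : Int) (umbral_minimo : Int) (punto_map : List (String × String)) : Prop :=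
  (punto_map.map Prod.fst).Nodup
instance (paginas_ok : Int) (umbral_minimo : Int) (punto_map : List (String × String)) : Decidable (Pre_lookup_starting_point_pages_py paginas_ok umbral_minimo punto_map) := by unfold Pre_lookup_starting_point_pages_py; infer_instance

def pvWitness_lookup_starting_point_pages_py : Int × Int × (List (String × String)) :=
  (12, 5, [("10", "punto A"), ("menos_7", "nivel bajo")])

def Spec_lookup_starting_point_pages_py (paginas_ok : Int) (umbral_minimo : Int) (punto_map : List (String × String)) (out : String) : Prop := out = lookup_starting_point_pages_py_alt paginas_ok umbral_minimo punto_map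
instance (paginas_ok : Int) (umbral_minimo : Int) (punto_map : List (String × String)) (out : String) : Decidable (Spec_lookup_starting_point_pages_py paginas_ok umbral_minimo punto_map out) := by unfold Spec_lookup_starting_point_pages_py; infer_instance

-- ===== CLAIM (what is proved, stated in full; the proofs are below) =====
def Claim_equal_lookup_starting_point_pages_py : Prop := ∀ (paginas_ok : Int) (umbral_minimo : Int) (punto_map : List (String × String)), Dom_lookup_starting_point_pages_py paginas_ok umbral_minimo punto_map → Pre_lookup_starting_point_pages_py paginas_ok umbral_minimo punto_map → Spec_lookup_starting_point_pages_py paginas_ok umbral_minimo punto_map (lookup_starting_point_pages_py paginas_ok umbral_minimo punto_map)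

-- ===== LEMMAS AND PROOFS =====

-- A's loop predicate
def pvQ (p : Int) (k : String) : Bool := PySem.Str.strIsdigit k && decide (pvIntOf k ≤ p)

-- ghost fold: B's fold with the winning key also recorded
def pvStepG (p : Int) (b : Option (String × Int × String)) (kv : String × String) : Option (String × Int × String) :=
  if PySem.Str.strIsdigit kv.1 then
    let n := pvIntOf kv.1
    if decide (n ≤ p) && (match b with | none => true | some x => decide (n > x.2.1)) then some (kv.1, n, kv.2)
    else b
  else b

theorem pvLoopA_eq_find (p : Int) (d : PySem.Dict String String) (l : List String) :
    pvLoopA p d l = match l.find? (pvQ p) with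
      | some k => (d.get? k).getD ""
      | none => "nivel_actual" := by
  induction l with
  | nil => rfl
  | cons k rest ih =>
      by_cases h : (PySem.Str.strIsdigit k && decide (pvIntOf k ≤ p)) = true
      · simp only [pvLoopA, if_pos h, List.find?_cons_of_pos (show pvQ p k = true from h)]
      · simp only [pvLoopA, if_neg h, List.find?_cons_of_neg (show ¬ pvQ p k = true from h), ih]

theorem pvStepB_eq_g (p : Int) (b : Option (String × Int × String)) (kv : String × String) :
    pvStepB p (b.map (fun x => (x.2.1, x.2.2))) kv = (pvStepG p b kv).map (fun x => (x.2.1, x.2.2)) := by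
  cases b with
  | none => simp [pvStepB, pvStepG, pvIntOf]; split_ifs <;> simp
  | some x => simp [pvStepB, pvStepG, pvIntOf]; split_ifs <;> simp

theorem pvFoldB_eq_g_aux (p : Int) (l : List (String × String)) (b : Option (String × Int × String)) :
    l.foldl (pvStepB p) (b.map (fun x => (x.2.1, x.2.2))) = (l.foldl (pvStepG p) b).map (fun x => (x.2.1, x.2.2)) := by
  induction l generalizing b with
  | nil => rfl
  | cons kv rest ih => rw [List.foldl_cons, List.foldl_cons, pvStepB_eq_g, ih]

theorem pvFoldB_eq_g (p : Int) (l : List (String × String)) :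
    l.foldl (pvStepB p) none = (l.foldl (pvStepG p) none).map (fun x => (x.2.1, x.2.2)) := by
  simpa using pvFoldB_eq_g_aux p l none

-- the key find?/insertBy interaction on a descending list
theorem pvFind_insertBy (p : Int) (k : String) (S : List String)
    (hS : S.Pairwise (fun a b => pvSortKey b ≤ pvSortKey a)) :
    (PySem.List.insertBy (fun a b => decide (pvSortKey b < pvSortKey a)) k S).find? (pvQ p) =
      match S.find? (pvQ p) with
      | none => if pvQ p k then some k else none
      | some k0 => if pvQ p k && decide (pvSortKey k0 < pvSortKey k) then some k else some k0 := by
  induction S with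
  | nil =>
      simp only [PySem.List.insertBy, List.find?_nil]
      cases hq : pvQ p k
      · rw [List.find?_cons_of_neg (by simp [hq]), List.find?_nil, if_neg (by simp [hq])]
      · rw [List.find?_cons_of_pos hq]; simp
  | cons a S' ih =>
      have hpw : S'.Pairwise (fun a b => pvSortKey b ≤ pvSortKey a) := (List.pairwise_cons.mp hS).2
      have ha : ∀ b ∈ S', pvSortKey b ≤ pvSortKey a := (List.pairwise_cons.mp hS).1
      simp only [PySem.List.insertBy]
      by_cases hk : (decide (pvSortKey a < pvSortKey k)) = true
      · rw [if_pos hk]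
        have hak : pvSortKey a < pvSortKey k := of_decide_eq_true hk
        cases hq : pvQ p k
        · rw [List.find?_cons_of_neg (by simp [hq])]
          cases hf : List.find? (pvQ p) (a :: S')
          · simp [hf]
          · simp [hf]
        · rw [List.find?_cons_of_pos hq]
          cases hf : List.find? (pvQ p) (a :: S') with
          | none => simp
          | some k0 =>
              have hk0 : k0 ∈ a :: S' := List.mem_of_find?_eq_some hf
              have : pvSortKey k0 < pvSortKey k := by
                rcases List.mem_cons.mp hk0 with h | h
                · simpa [h] using hak
                · exact lt_of_le_of_lt (le_trans (by simp) (ha _ h)) hak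
              simp [this]
      · rw [if_neg hk]
        have hak : pvSortKey k ≤ pvSortKey a := le_of_not_gt (by simpa using hk)
        cases hqa : pvQ p a
        · rw [List.find?_cons_of_neg (by simp [hqa]), List.find?_cons_of_neg (by simp [hqa])]
          exact ih hpw
        · rw [List.find?_cons_of_pos hqa, List.find?_cons_of_pos hqa]
          have hcond : decide (pvSortKey a < pvSortKey k) = false := decide_eq_false (not_lt.mpr hak)
          simp [hcond]

-- the invariant of the right-to-left induction
theorem pvMain (p : Int) (l : List (String × String)) :
    ((PySem.List.sorted (l.map Prod.fst) pvSortKey true).find? (pvQ p) =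
        (l.foldl (pvStepG p) none).map (·.1)) ∧
      (∀ x, l.foldl (pvStepG p) none = some x → pvQ p x.1 = true ∧ pvSortKey x.1 = x.2.1 ∧ (x.1, x.2.2) ∈ l) := by
  induction l using List.reverseRecOn with
  | nil =>
      constructor
      · rfl
      · intro x h; cases h
  | append_singleton l kv ih =>
      obtain ⟨ih1, ih2⟩ := ih
      have hs : PySem.List.sorted ((l ++ [kv]).map Prod.fst) pvSortKey true
          = PySem.List.insertBy (fun a b => decide (pvSortKey b < pvSortKey a)) kv.1
              (PySem.List.sorted (l.map Prod.fst) pvSortKey true) := by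
        rw [PySem.List.sorted_rev_eq_foldl_insertBy, PySem.List.sorted_rev_eq_foldl_insertBy,
            List.map_append, List.foldl_append]
        rfl
      have hfold : (l ++ [kv]).foldl (pvStepG p) none = pvStepG p (l.foldl (pvStepG p) none) kv := by
        rw [List.foldl_append]; rfl
      rw [hs, hfold,
          pvFind_insertBy p kv.1 _ (PySem.List.sorted_pairwise_rev (l.map Prod.fst) pvSortKey), ih1]
      by_cases hd : PySem.Chars.strIsdigit kv.1.toList = true
      · have hdS : PySem.Str.strIsdigit kv.1 = true := by simpa using hd
        have hskkv : pvSortKey kv.1 = (PySem.Int.ofStr? kv.1).getD 0 := by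
          simp [pvSortKey, pvIntOf, hd]
        cases hG : l.foldl (pvStepG p) none with
        | none =>
            constructor
            · by_cases hle : (PySem.Int.ofStr? kv.1).getD 0 ≤ p
              · simp [pvStepG, pvQ, pvIntOf, hd, hle]
              · simp [pvStepG, pvQ, pvIntOf, hd, hle]
            · intro x hx
              simp only [pvStepG, if_pos hdS] at hx
              by_cases hle : (PySem.Int.ofStr? kv.1).getD 0 ≤ p
              · rw [if_pos (by simp [pvIntOf, hle])] at hx
                cases hx
                exact ⟨by simp [pvQ, pvIntOf, hd, hle], hskkv, by simp⟩
              · rw [if_neg (by simp [pvIntOf, hle])] at hx; cases hx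
        | some x0 =>
            obtain ⟨hq0, hsk0, hmem0⟩ := ih2 x0 hG
            constructor
            · by_cases hle : (PySem.Int.ofStr? kv.1).getD 0 ≤ p
              · by_cases hgt : x0.2.1 < (PySem.Int.ofStr? kv.1).getD 0
                · simp [pvStepG, pvQ, pvIntOf, hd, hle, hgt, hskkv, hsk0]
                · simp [pvStepG, pvQ, pvIntOf, hd, hle, hgt, hskkv, hsk0]
              · simp [pvStepG, pvQ, pvIntOf, hd, hle, hskkv, hsk0]
            · intro x hx
              simp only [pvStepG, if_pos hdS] at hx
              by_cases hcond : (decide (pvIntOf kv.1 ≤ p) && decide (pvIntOf kv.1 > x0.2.1)) = true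
              · rw [if_pos hcond] at hx
                cases hx
                obtain ⟨h1, _⟩ := (Bool.and_eq_true _ _).mp hcond
                exact ⟨by simp [pvQ, pvIntOf, hd]; exact of_decide_eq_true h1, hskkv, by simp⟩
              · rw [if_neg hcond] at hx
                cases hx
                exact ⟨hq0, hsk0, List.mem_append_left _ hmem0⟩
      · have hdS : ¬ PySem.Str.strIsdigit kv.1 = true := by simpa using hd
        cases hG : l.foldl (pvStepG p) none with
        | none =>
            constructor
            · simp [pvStepG, pvQ, hd]
            · intro x hx
              simp only [pvStepG, if_neg hdS] at hx
              cases hx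
        | some x0 =>
            obtain ⟨hq0, hsk0, hmem0⟩ := ih2 x0 hG
            constructor
            · simp [pvStepG, pvQ, hd]
            · intro x hx
              simp only [pvStepG, if_neg hdS] at hx
              cases hx
              exact ⟨hq0, hsk0, List.mem_append_left _ hmem0⟩

-- ===== VERDICT (by name: the statement is the Claim_ definition above) =====
theorem lookup_starting_point_pages_py_spec : Claim_equal_lookup_starting_point_pages_py := by
  intro p u m hDom hPre
  unfold Spec_lookup_starting_point_pages_py lookup_starting_point_pages_py
    lookup_starting_point_pages_py_alt
  by_cases h1 : p < u
  · simp only [if_pos h1]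
  · simp only [if_neg h1]
    by_cases h2 : (PySem.Dict.mk m).contains (PySem.Int.toStr p) = true
    · simp only [if_pos h2]
    · simp only [Bool.not_eq_true] at h2
      simp only [h2, Bool.false_eq_true, if_false]
      have hkeys : (PySem.Dict.mk m).keys = m.map Prod.fst := rfl
      rw [pvLoopA_eq_find, hkeys, pvFoldB_eq_g, (pvMain p m).1]
      cases hG : m.foldl (pvStepG p) none with
      | none => rfl
      | some x =>
          obtain ⟨hq0, hsk0, hmem⟩ := (pvMain p m).2 x hG
          have hget : (PySem.Dict.mk m).get? x.1 = some x.2.2 :=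
            PySem.Dict.get?_of_mem_items (PySem.Dict.mk m) (by exact hmem) (by exact hPre)
          simp [hget]
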